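-- pv_equiv track=rewrite | github.com/patriciomelor/Proyecto-plannit | src/status_encargado/views.py | tamano_grafico_1
-- ===== SOURCE A (Python) =====
-- def tamano_grafico_1(lista_grafico_uno):
--
--     # lista_grafico_uno = self.grafico_1()
--     maximo = 0
--     cont = 0
--
--     #Se obtiene el valor máximo del gráfico
--     for valores in lista_grafico_uno:
--         if cont == 0:
--             maximo = valores[1]
--             cont = 1
--         else:
--             if maximo < valores[1]:
--                 maximo = valores[1]
--
--     #Se verífica que el maximo sea divisible por 10, para el caso de un maximo superior a 20
--     division_exacta = 0
--     if maximo > 20: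
--         division_exacta = maximo % 10
--         while division_exacta != 0:
--             maximo = maximo + 1
--             division_exacta = maximo % 10
--     maximo = maximo + 1
--
--     return maximo
-- ===== SOURCE B (Python) =====
-- def tamano_grafico_1(lista_grafico_uno):
--     maximo = max((v[1] for v in lista_grafico_uno), default=0)
--     if maximo > 20:
--         maximo += (10 - maximo % 10) % 10
--     return maximo + 1
-- ===== Notes on version B (the rewrite author's own statement) =====
-- stated objective: simpler
-- what changed: Replaces the cont-flag running-max loop with a single max(..., default=0) expression and the increment-until-divisible while-loop with a closed-form ceiling-to-multiple-of-10 formula.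
import Mathlib
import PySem

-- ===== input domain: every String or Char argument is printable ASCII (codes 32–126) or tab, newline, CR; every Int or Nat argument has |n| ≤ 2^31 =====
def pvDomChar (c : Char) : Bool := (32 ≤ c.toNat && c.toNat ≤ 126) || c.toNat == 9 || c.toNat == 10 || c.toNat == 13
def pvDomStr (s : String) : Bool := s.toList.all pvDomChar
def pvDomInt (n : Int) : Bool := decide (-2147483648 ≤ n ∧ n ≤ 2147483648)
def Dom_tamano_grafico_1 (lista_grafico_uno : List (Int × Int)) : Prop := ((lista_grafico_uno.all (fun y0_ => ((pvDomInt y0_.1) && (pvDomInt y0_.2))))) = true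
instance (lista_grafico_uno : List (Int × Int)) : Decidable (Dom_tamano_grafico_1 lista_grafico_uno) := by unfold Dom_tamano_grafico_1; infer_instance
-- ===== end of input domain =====

-- B replaces A's cont-flag running-max loop by max(..., default=0) and A's
-- increment-until-divisible while-loop by a closed-form round-up; simpler, same cost.

-- ===== PORT A =====
-- the 'while division_exacta != 0: maximo += 1; division_exacta = maximo % 10' loop;
-- fuel only makes the recursion structural: the loop needs at most 9 steps, 10 always suffices
def tgWhile (fuel : Nat) (maximo : Int) : Int :=
  match fuel with
  | 0 => maximo
  | fuel + 1 => if PySem.Int.mod maximo 10 ≠ 0 then tgWhile fuel (maximo + 1) else maximo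

def tamano_grafico_1 (lista_grafico_uno : List (Int × Int)) : Int :=
  -- for-loop with state (maximo, cont)
  let s := lista_grafico_uno.foldl
    (fun (s : Int × Int) valores =>
      if s.2 = 0 then (valores.2, 1)
      else if s.1 < valores.2 then (valores.2, s.2) else s)
    (0, 0)
  let maximo := s.1
  let maximo := if maximo > 20 then tgWhile 10 maximo else maximo
  maximo + 1

-- ===== PORT B =====
def tamano_grafico_1_alt (lista_grafico_uno : List (Int × Int)) : Int :=
  let maximo := (PySem.List.max? (lista_grafico_uno.map Prod.snd) (fun x => x)).getD 0
  let maximo := if maximo > 20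
    then maximo + PySem.Int.mod (10 - PySem.Int.mod maximo 10) 10
    else maximo
  maximo + 1

-- ===== PRECONDITION & SPEC =====
def Spec_tamano_grafico_1 (lista_grafico_uno : List (Int × Int)) (out : Int) : Prop := out = tamano_grafico_1_alt lista_grafico_uno
instance (lista_grafico_uno : List (Int × Int)) (out : Int) : Decidable (Spec_tamano_grafico_1 lista_grafico_uno out) := by unfold Spec_tamano_grafico_1; infer_instance

-- ===== CLAIM (what is proved, stated in full; the proofs are below) =====
def Claim_equal_tamano_grafico_1 : Prop := ∀ (lista_grafico_uno : List (Int × Int)), Dom_tamano_grafico_1 lista_grafico_uno → Spec_tamano_grafico_1 lista_grafico_uno (tamano_grafico_1 lista_grafico_uno)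

-- ===== LEMMAS AND PROOFS =====

-- the while-loop equals the closed-form round-up
theorem tgWhile_eq_aux : ∀ (k fuel : Nat) (m : Int), ((10 - m % 10) % 10).toNat = k →
    k < fuel → tgWhile fuel m = m + (10 - m % 10) % 10 := by
  intro k
  induction k with
  | zero =>
    intro fuel m h hf
    obtain ⟨f, rfl⟩ : ∃ f, fuel = f + 1 := ⟨fuel - 1, by omega⟩
    have hm : PySem.Int.mod m 10 = m % 10 :=
      PySem.Int.mod_eq_emod_of_pos (by norm_num)
    rw [tgWhile, hm]
    have h0 : m % 10 = 0 := by omega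
    simp [h0]
  | succ k ih =>
    intro fuel m h hf
    obtain ⟨f, rfl⟩ : ∃ f, fuel = f + 1 := ⟨fuel - 1, by omega⟩
    have hm : PySem.Int.mod m 10 = m % 10 :=
      PySem.Int.mod_eq_emod_of_pos (by norm_num)
    rw [tgWhile, hm]
    have hne : m % 10 ≠ 0 := by omega
    rw [if_pos hne, ih f (m + 1) (by omega) (by omega)]
    omega

theorem tgWhile_eq (m : Int) : tgWhile 10 m = m + PySem.Int.mod (10 - PySem.Int.mod m 10) 10 := by
  rw [PySem.Int.mod_eq_emod_of_pos (by norm_num : (0:Int) < 10),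
      PySem.Int.mod_eq_emod_of_pos (by norm_num : (0:Int) < 10)]
  exact tgWhile_eq_aux ((10 - m % 10) % 10).toNat 10 m rfl (by omega)

-- A's fold after the first element is the plain running max
theorem foldA_eq_max (t : List (Int × Int)) : ∀ (m : Int),
    t.foldl (fun (s : Int × Int) valores =>
      if s.2 = 0 then (valores.2, 1)
      else if s.1 < valores.2 then (valores.2, s.2) else s) (m, 1)
    = ((t.map Prod.snd).foldl max m, 1) := by
  induction t with
  | nil => intro m; simp
  | cons v t ih =>
    intro m
    simp only [List.foldl_cons, List.map_cons]
    rw [show (if (m, (1:Int)).2 = 0 then (v.2, (1:Int))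
          else if (m, (1:Int)).1 < v.2 then (v.2, (m, (1:Int)).2) else (m, 1)) = (max m v.2, 1) by
      simp only []
      split_ifs with h1 h2 <;> simp_all
      omega]
    exact ih (max m v.2)

theorem fold_eq_max? (l : List (Int × Int)) :
    (l.foldl (fun (s : Int × Int) valores =>
      if s.2 = 0 then (valores.2, 1)
      else if s.1 < valores.2 then (valores.2, s.2) else s) (0, 0)).1
    = (PySem.List.max? (l.map Prod.snd) (fun x => x)).getD 0 := by
  cases l with
  | nil => simp [PySem.List.max?]
  | cons v t =>
    simp only [List.foldl_cons, List.map_cons]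
    norm_num
    rw [foldA_eq_max, PySem.List.max?_id_cons]
    simp

-- ===== VERDICT (by name: the statement is the Claim_ definition above) =====
theorem tamano_grafico_1_spec : Claim_equal_tamano_grafico_1 := by
  intro l _
  unfold Spec_tamano_grafico_1 tamano_grafico_1 tamano_grafico_1_alt
  simp only [fold_eq_max?]
  split_ifs with h
  · rw [tgWhile_eq]
  · rfl
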